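-- pv_equiv track=rewrite | github.com/smussabir/allmyalts | main.py | make_wowhead_url_xml
-- ===== SOURCE A (Python) =====
-- def make_wowhead_url_xml(item_id, bonus_list, ilvl):
--     """
--     Returns a WoWHead URL like:
--       https://www.wowhead.com/item={item_id}&xml?bonus=xxx:xxx&ilvl=yyy
--
--     Example:
--       https://www.wowhead.com/item=211024&xml?bonus=6652:10877:10377:10266:3198:10255&ilvl=619
--     """
--     # Base: item=xxx &xml
--     # We'll always add "&xml" directly after the item= ID
--     base_url = f"https://www.wowhead.com/item={item_id}&xml"
--
--     # Build bonus query if we have a list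
--     bonus_query = ""
--     if bonus_list:
--         # e.g., "6652:10877:10377:10266:3198:10255"
--         bonus_str = ":".join(str(b) for b in bonus_list)
--         bonus_query = f"?bonus={bonus_str}"  # note the '?' as the first query param
--
--         # if we also have an ilvl, append &ilvl=...
--         if ilvl:
--             bonus_query += f"&ilvl={ilvl}"
--     else:
--         # If no bonus_list but we do have an ilvl, we'd do "?ilvl=..."
--         if ilvl:
--             bonus_query = f"?ilvl={ilvl}"
--
--     return base_url + bonus_query
-- ===== SOURCE B (Python) =====
-- def make_wowhead_url_xml(item_id, bonus_list, ilvl):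
--     base = f"https://www.wowhead.com/item={item_id}&xml"
--     params = []
--     if bonus_list:
--         params.append("bonus=" + ":".join(str(b) for b in bonus_list))
--     if ilvl:
--         params.append(f"ilvl={ilvl}")
--     return base + ("?" + "&".join(params) if params else "")
-- ===== Notes on version B (the rewrite author's own statement) =====
-- stated objective: simpler
-- what changed: Replaces the nested if/else that hardcodes the '?'/'&' prefixes on each branch with a uniform accumulate-parameters-then-join: build a list of 'key=value' strings and attach '?' + '&'.join(params) once.
import Mathlib
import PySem

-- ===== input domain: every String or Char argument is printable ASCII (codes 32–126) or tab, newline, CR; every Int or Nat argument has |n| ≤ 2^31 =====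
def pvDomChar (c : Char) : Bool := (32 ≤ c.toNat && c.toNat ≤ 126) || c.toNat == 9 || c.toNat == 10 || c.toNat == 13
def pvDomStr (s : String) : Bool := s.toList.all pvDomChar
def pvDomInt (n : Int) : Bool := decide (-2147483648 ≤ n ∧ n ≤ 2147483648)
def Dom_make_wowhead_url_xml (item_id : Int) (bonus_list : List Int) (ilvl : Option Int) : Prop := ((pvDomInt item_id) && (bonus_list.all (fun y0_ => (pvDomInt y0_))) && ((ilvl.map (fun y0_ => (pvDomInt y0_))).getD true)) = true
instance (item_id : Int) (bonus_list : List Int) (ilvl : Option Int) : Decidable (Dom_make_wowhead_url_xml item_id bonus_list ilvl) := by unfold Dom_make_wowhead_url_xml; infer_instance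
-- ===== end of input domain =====

-- B replaces A's nested if/else with hardcoded '?'/'&' prefixes by an accumulate-params-then-join (objective: simpler).

-- ===== PORT A =====
-- literal transliteration of A: base, then bonus_query built by the nested branches, then concatenated
def make_wowhead_url_xml (item_id : Int) (bonus_list : List Int) (ilvl : Option Int) : String :=
  let base_url := "https://www.wowhead.com/item=" ++ PySem.Int.toStr item_id ++ "&xml"
  let bonus_query :=
    if bonus_list ≠ [] then
      let bonus_str := PySem.Str.join ":" (bonus_list.map PySem.Int.toStr)
      let bq := "?bonus=" ++ bonus_str
      match ilvl with
      | some v => if v ≠ 0 then bq ++ "&ilvl=" ++ PySem.Int.toStr v else bq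
      | none => bq
    else
      match ilvl with
      | some v => if v ≠ 0 then "?ilvl=" ++ PySem.Int.toStr v else ""
      | none => ""
  base_url ++ bonus_query

-- ===== PORT B =====
-- literal transliteration of Source B: build the params list, then '?' ++ '&'.join(params) if nonempty
def make_wowhead_url_xml_alt (item_id : Int) (bonus_list : List Int) (ilvl : Option Int) : String :=
  let base := "https://www.wowhead.com/item=" ++ PySem.Int.toStr item_id ++ "&xml"
  let params : List String :=
    (if bonus_list ≠ [] then
       ["bonus=" ++ PySem.Str.join ":" (bonus_list.map PySem.Int.toStr)] else []) ++
    (match ilvl with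
     | some v => if v ≠ 0 then ["ilvl=" ++ PySem.Int.toStr v] else []
     | none => [])
  base ++ (if params ≠ [] then "?" ++ PySem.Str.join "&" params else "")

-- ===== PRECONDITION & SPEC =====
def Spec_make_wowhead_url_xml (item_id : Int) (bonus_list : List Int) (ilvl : Option Int) (out : String) : Prop := out = make_wowhead_url_xml_alt item_id bonus_list ilvl
instance (item_id : Int) (bonus_list : List Int) (ilvl : Option Int) (out : String) : Decidable (Spec_make_wowhead_url_xml item_id bonus_list ilvl out) := by unfold Spec_make_wowhead_url_xml; infer_instance

-- ===== CLAIM (what is proved, stated in full; the proofs are below) =====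
def Claim_equal_make_wowhead_url_xml : Prop := ∀ (item_id : Int) (bonus_list : List Int) (ilvl : Option Int), Dom_make_wowhead_url_xml item_id bonus_list ilvl → Spec_make_wowhead_url_xml item_id bonus_list ilvl (make_wowhead_url_xml item_id bonus_list ilvl)

-- ===== LEMMAS AND PROOFS =====
-- (string equalities are proved by injectivity of String.toList plus simp on the char-list level)

-- ===== VERDICT (by name: the statement is the Claim_ definition above) =====
theorem make_wowhead_url_xml_spec : Claim_equal_make_wowhead_url_xml := by
  intro item_id bonus_list ilvl _
  unfold Spec_make_wowhead_url_xml make_wowhead_url_xml make_wowhead_url_xml_alt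
  cases bonus_list with
  | nil =>
    cases ilvl with
    | none => simp
    | some v =>
      by_cases hv : v = 0
      · simp [hv]
      · apply String.toList_inj.mp
        simp [hv, PySem.Str.join, PySem.Chars.join, List.intercalate]
  | cons b bs =>
    cases ilvl with
    | none =>
      apply String.toList_inj.mp
      simp [PySem.Str.join, PySem.Chars.join, List.intercalate]
    | some v =>
      by_cases hv : v = 0 <;>
        · apply String.toList_inj.mp
          simp [hv, PySem.Str.join, PySem.Chars.join, List.intercalate]
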